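-- pv_equiv track=rewrite | github.com/dylan9012/BIO20 | Alpha Complex.py | initialise
-- ===== SOURCE A (Python) =====
-- ALPHABET = "ABCDEFGHIJKLMNOPQRSTUVWXYZ"
--
-- def initialise(plan, output, chosen, length):
-- 	if len(plan) > 0:
-- 		for i in ALPHABET:
-- 			if i not in plan and i not in chosen:
-- 				output.append([i,plan[0]])
-- 				chosen.append(i)
-- 				plan.pop(0)
-- 				return initialise(plan, output, chosen, length)
-- 	else:
-- 		rest = ALPHABET[0:length]
-- 		remaining = []
-- 		for j in rest:
-- 			if j not in chosen:
-- 				remaining.append(j)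
-- 		output.append(remaining)
-- 		return output
-- ===== SOURCE B (Python) =====
-- ALPHABET = "ABCDEFGHIJKLMNOPQRSTUVWXYZ"
--
-- # Re-implementation: one forward pass with a multiplicity dict of the not-yet-processed
-- # items instead of A's recursion that rescans and mutates plan/chosen in place.
-- # B does NOT mutate its arguments (the original does); same return value.
-- def initialise(plan, output, chosen, length):
--     remaining = {}
--     for item in plan:
--         remaining[item] = remaining.get(item, 0) + 1
--     taken = set(chosen)
--     out = list(output)
--     for item in plan:
--         free = [c for c in ALPHABET if c not in taken and not remaining.get(c, 0)]
--         if not free: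
--             return None
--         out.append([free[0], item])
--         taken.add(free[0])
--         remaining[item] -= 1
--     out.append([c for c in ALPHABET[:length] if c not in taken])
--     return out
-- ===== Notes on version B (the rewrite author's own statement) =====
-- stated objective: faster
-- what changed: Replaces A's recursion that mutates plan/output/chosen in place and rescans the shrinking plan for each letter by a single non-mutating forward pass over plan with a precomputed multiplicity dict of the not-yet-processed items and a membership set for chosen letters.
import Mathlib
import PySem

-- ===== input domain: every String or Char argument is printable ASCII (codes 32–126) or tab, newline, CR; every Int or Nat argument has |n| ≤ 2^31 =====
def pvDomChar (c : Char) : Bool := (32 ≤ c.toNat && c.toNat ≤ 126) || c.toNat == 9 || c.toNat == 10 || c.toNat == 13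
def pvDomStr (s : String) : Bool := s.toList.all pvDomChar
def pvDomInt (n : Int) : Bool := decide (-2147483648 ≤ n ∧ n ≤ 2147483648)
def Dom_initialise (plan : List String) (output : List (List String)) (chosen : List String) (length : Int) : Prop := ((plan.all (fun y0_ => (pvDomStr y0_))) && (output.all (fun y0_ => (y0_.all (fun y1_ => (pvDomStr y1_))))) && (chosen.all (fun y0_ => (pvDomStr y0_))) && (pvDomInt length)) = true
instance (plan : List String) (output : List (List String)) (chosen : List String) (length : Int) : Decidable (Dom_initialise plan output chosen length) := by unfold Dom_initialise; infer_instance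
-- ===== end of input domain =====

-- B replaces A's recursion-with-mutation (which rescans the shrinking plan per step) by one
-- forward pass over a multiplicity dict of the not-yet-processed items (objective: faster; measured).
-- A mutates plan/output/chosen in place; B does not: the equivalence is about the RETURN value only.

-- ===== PORT A =====
-- ALPHABET, iterated as its 26 one-character strings
def pyAlpha : List String :=
  ["A","B","C","D","E","F","G","H","I","J","K","L","M",
   "N","O","P","Q","R","S","T","U","V","W","X","Y","Z"]

def initialise (plan : List String) (output : List (List String)) (chosen : List String) (length : Int) : List (List String) :=
  match plan with
  | p0 :: rest =>
    -- for i in ALPHABET: first i with i not in plan and i not in chosen, then recurse after the mutations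
    match pyAlpha.find? (fun i => !((p0 :: rest).contains i) && !(chosen.contains i)) with
    | some i => initialise rest (output ++ [[i, p0]]) (chosen ++ [i]) length
    | none => []  -- Python falls off the for loop and returns None; excluded by Pre_initialise
  | [] =>
    let rest := PySem.List.slice pyAlpha (some 0) (some length)   -- ALPHABET[0:length]
    let remaining := rest.filter (fun j => !(chosen.contains j))
    output ++ [remaining]

-- ===== PORT B =====
-- remaining = {} ; for item in plan: remaining[item] = remaining.get(item, 0) + 1
def altCounts (plan : List String) : PySem.Dict String Int :=
  plan.foldl (fun d item => d.insert item (d.getD item 0 + 1)) PySem.Dict.empty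

-- the forward pass: for item in plan: pick first letter not in taken with remaining.get(c,0) falsy, or return None
def altLoop (items : List String) (remaining : PySem.Dict String Int) (taken : PySem.Set String)
    (out : List (List String)) : Option (List (List String) × PySem.Set String) :=
  match items with
  | [] => some (out, taken)
  | item :: rest =>
    match pyAlpha.filter (fun c => !(PySem.Set.contains taken c) && (remaining.getD c 0 == 0)) with
    | [] => none
    | c :: _ =>
        altLoop rest (remaining.insert item (remaining.getD item 0 - 1)) (PySem.Set.add taken c)
          (out ++ [[c, item]])

-- out.append([c for c in ALPHABET[:length] if c not in taken]) / the None branch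
def altFinish (r : Option (List (List String) × PySem.Set String)) (length : Int) : List (List String) :=
  match r with
  | none => []   -- Python B returns None here; excluded by Pre_initialise
  | some (out, tk) =>
      out ++ [(PySem.List.slice pyAlpha (some 0) (some length)).filter
                (fun c => !(PySem.Set.contains tk c))]

def initialise_alt (plan : List String) (output : List (List String)) (chosen : List String) (length : Int) : List (List String) :=
  altFinish (altLoop plan (altCounts plan) (PySem.Set.ofList chosen) output) length

-- ===== PRECONDITION & SPEC =====
-- Pre_ excludes exactly the inputs on which A returns None (no value of the declared list type):
-- those where at some step k fewer than k+1 alphabet letters are outside chosen and the remaining plan.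
def Pre_initialise (plan : List String) (output : List (List String)) (chosen : List String) (length : Int) : Prop :=
  ∀ k < plan.length,
    k < (pyAlpha.filter (fun c => !(chosen.contains c) && !((plan.drop k).contains c))).length
instance (plan : List String) (output : List (List String)) (chosen : List String) (length : Int) : Decidable (Pre_initialise plan output chosen length) := by unfold Pre_initialise; infer_instance

def pvWitness_initialise : List String × List (List String) × List String × Int :=
  (["alpha", "beta"], [], ["A"], 4)

def Spec_initialise (plan : List String) (output : List (List String)) (chosen : List String) (length : Int) (out : List (List String)) : Prop := out = initialise_alt plan output chosen length
instance (plan : List String) (output : List (List String)) (chosen : List String) (length : Int) (out : List (List String)) : Decidable (Spec_initialise plan output chosen length out) := by unfold Spec_initialise; infer_instance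

-- ===== CLAIM (what is proved, stated in full; the proofs are below) =====
def Claim_equal_initialise : Prop := ∀ (plan : List String) (output : List (List String)) (chosen : List String) (length : Int), Dom_initialise plan output chosen length → Pre_initialise plan output chosen length → Spec_initialise plan output chosen length (initialise plan output chosen length)

-- ===== LEMMAS AND PROOFS =====

theorem getD_altCounts (plan : List String) (c : String) :
    (altCounts plan).getD c 0 = (plan.count c : Int) := by
  unfold altCounts
  rw [PySem.Dict.getD_foldl_insert_add_one]
  simp

theorem head?_filter' (p : String → Bool) (l : List String) :
    (l.filter p).head? = l.find? p := by
  induction l with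
  | nil => rfl
  | cons a l ih => by_cases h : p a <;> simp [h, ih]

-- main invariant: A's recursion equals B's pass whenever taken and chosen have the same
-- members and `remaining` holds the multiplicities of the items A has not yet popped
theorem main_eq (plan : List String) :
    ∀ (output : List (List String)) (chosen : List String) (taken : PySem.Set String)
      (rem : PySem.Dict String Int) (length : Int),
    (∀ c, c ∈ taken ↔ c ∈ chosen) →
    (∀ c, rem.getD c 0 = (plan.count c : Int)) →
    initialise plan output chosen length = altFinish (altLoop plan rem taken output) length := by
  induction plan with
  | nil =>
    intro output chosen taken rem length h _
    simp only [initialise, altLoop, altFinish]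
    congr 1
    refine congrArg (fun l => [l]) (List.filter_congr ?_)
    intro c _
    simp [PySem.Set.contains, h c]
  | cons p0 rest ih =>
    intro output chosen taken rem length h hrem
    simp only [altLoop]
    have hpred :
        (fun c => !(PySem.Set.contains taken c) && (rem.getD c 0 == 0))
        = (fun i => !((p0 :: rest).contains i) && !(chosen.contains i)) := by
      funext c
      rw [hrem c]
      by_cases h1 : c ∈ (p0 :: rest)
      · have hb : ((List.count c (p0 :: rest) : Int) == 0) = false := by
          have hpos := List.count_pos_iff.mpr h1
          simp only [beq_eq_false_iff_ne, ne_eq, Nat.cast_eq_zero]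
          omega
        rw [hb]
        rcases List.mem_cons.mp h1 with h2 | h2 <;> simp [h2]
      · have hz : List.count c (p0 :: rest) = 0 := List.count_eq_zero.mpr h1
        have h2 : ¬ c = p0 := fun e => h1 (e ▸ List.mem_cons_self ..)
        have h3 : c ∉ rest := fun e => h1 (List.mem_cons_of_mem _ e)
        rw [hz]
        simp [PySem.Set.contains, h c, h2, h3]
    rw [hpred]
    cases hf : pyAlpha.filter (fun i => !((p0 :: rest).contains i) && !(chosen.contains i)) with
    | nil =>
      have : pyAlpha.find? (fun i => !((p0 :: rest).contains i) && !(chosen.contains i)) = none := by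
        rw [← head?_filter', hf]; rfl
      simp only [initialise, this, altFinish]
    | cons c cs =>
      have : pyAlpha.find? (fun i => !((p0 :: rest).contains i) && !(chosen.contains i)) = some c := by
        rw [← head?_filter', hf]; rfl
      simp only [initialise, this]
      refine ih (output ++ [[c, p0]]) (chosen ++ [c]) (PySem.Set.add taken c)
        (rem.insert p0 (rem.getD p0 0 - 1)) length
        (by intro d; rw [PySem.Set.mem_add, List.mem_append, h d]; simp) ?_
      intro d
      rw [PySem.Dict.getD_insert, hrem p0, hrem d]
      by_cases hd : d = p0
      · subst hd
        rw [if_pos rfl]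
        simp [List.count_cons_self]
      · rw [if_neg hd]
        simp [List.count_cons]
        exact fun e => hd e.symm

-- ===== VERDICT (by name: the statement is the Claim_ definition above) =====
theorem initialise_spec : Claim_equal_initialise := by
  intro plan output chosen length _ _
  unfold Spec_initialise initialise_alt
  exact main_eq plan output chosen (PySem.Set.ofList chosen) (altCounts plan) length
    (fun c => PySem.Set.mem_ofList _ _) (fun c => getD_altCounts plan c)
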